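-- pv_equiv track=rewrite | github.com/szZzr/classic-crypto | src/Extra-Symmetrics/LFSR/LFSR.py | keystream_finder
-- ===== SOURCE A (Python) =====
-- def alphabet ():
--     '''
--     Dictionary creator for alphabet with 5bit-code
--     :return: dictionary
--     '''
--     ab=[]
--     bin_ab=[]
--     for i in range(32):
--         temp = format(i,'b')
--         temp = (5-len(temp))*'0'+temp
--         bin_ab.append(temp)
--     for i in range(65,65+26):
--         ab.append(chr(i))
--     ab.append('.')
--     ab.append('!')
--     ab.append('?')
--     ab.append('(')
--     ab.append(')')
--     ab.append('-')
--     my_alphabet = {ab[x]:bin_ab[x] for x in range(len(ab))}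
--     return my_alphabet
--
-- def keystream_finder(msg,encr):
--     msg = msg.upper()
--     encr = encr.upper()
--     ab = alphabet()
--     bin_msg = ab.get(msg[0])+ab.get(msg[1])
--     bin_encr = ab.get(encr[0])+ab.get(encr[1])
--     bin_key=[]
--     for i in range(10):
--         bin_key.append(int(bin_msg[i]) ^ int(bin_encr[i]))
--     return bin_key
-- ===== SOURCE B (Python) =====
-- def keystream_finder(msg, encr):
--     # index each alphabet char 0..31, XOR the two integer codes per position,
--     # and emit the 5 bits of each XOR by shifting, high bit first
--     idx = {c: i for i, c in enumerate("ABCDEFGHIJKLMNOPQRSTUVWXYZ.!?()-")}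
--     out = []
--     for k in (0, 1):
--         x = idx[msg[k].upper()] ^ idx[encr[k].upper()]
--         out.extend((x >> s) & 1 for s in (4, 3, 2, 1, 0))
--     return out
-- ===== Notes on version B (the rewrite author's own statement) =====
-- stated objective: alternative
-- what changed: B replaces A's char->5-bit-string dict, string concatenation and 10-iteration per-bit string loop by a char->integer-index dict, one integer XOR per character position (2 iterations) and bit extraction by shifting.
-- outside the precondition, e.g. on keystream_finder('1B', 'CD'): A raises TypeError, B raises KeyError; on keystream_finder('A', 'BC'): A raises IndexError, B raises IndexError
import Mathlib
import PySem

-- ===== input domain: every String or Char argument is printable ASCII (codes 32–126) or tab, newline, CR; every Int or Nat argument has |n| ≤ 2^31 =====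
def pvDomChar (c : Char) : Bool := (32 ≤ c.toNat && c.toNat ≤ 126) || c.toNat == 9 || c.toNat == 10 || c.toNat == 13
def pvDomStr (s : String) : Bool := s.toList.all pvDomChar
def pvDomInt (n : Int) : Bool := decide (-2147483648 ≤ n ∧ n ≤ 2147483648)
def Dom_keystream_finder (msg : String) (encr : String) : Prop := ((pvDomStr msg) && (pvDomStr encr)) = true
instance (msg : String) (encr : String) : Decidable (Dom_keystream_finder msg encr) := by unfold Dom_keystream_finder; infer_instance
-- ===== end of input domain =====

-- B computes each keystream block by one integer XOR of alphabet indices and bit-shifting,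
-- instead of A's XOR of concatenated 5-bit strings bit by bit (alternative decomposition, same cost).


-- ===== PORT A =====
-- alphabet(): dict from each alphabet char to its 5-bit binary string (kept as List Char)
def alphabetA : PySem.Dict Char (List Char) :=
  let bin_ab := (PySem.List.pyRange 0 32 1).foldl (fun acc i =>
      let temp := PySem.Int.toBinChars i
      let temp := List.replicate (5 - temp.length) '0' ++ temp
      acc ++ [temp]) []
  let ab := (PySem.List.pyRange 65 (65+26) 1).foldl (fun acc i => acc ++ [Char.ofNat i.toNat]) []
  let ab := ab ++ ['.'] ++ ['!'] ++ ['?'] ++ ['('] ++ [')'] ++ ['-']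
  (PySem.List.pyRange 0 ab.length 1).foldl (fun d x =>
      d.insert (PySem.List.pyGetD ab x ' ') (PySem.List.pyGetD bin_ab x [])) PySem.Dict.empty

-- int(x) ^ int(y) for one binary digit each; [] where int() would raise (unreachable: digits are '0'/'1')
def xorDigitA (x y : Char) : List Int :=
  match PySem.Int.ofChars? [x], PySem.Int.ofChars? [y] with
  | some xv, some yv => [PySem.Int.bxor xv yv]
  | _, _ => []

-- the 'for i in range(10)' XOR loop of A (generic in the range bound, used with 10)
def xorLoopA (n : Int) (bin_msg bin_encr : List Char) : List Int :=
  (PySem.List.pyRange 0 n 1).foldl (fun acc i =>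
    match PySem.List.pyGet? bin_msg i, PySem.List.pyGet? bin_encr i with
    | some x, some y => acc ++ xorDigitA x y
    | _, _ => acc) []

def keystream_finder (msg : String) (encr : String) : List Int :=
  let msgU := PySem.Chars.upper msg.toList
  let encrU := PySem.Chars.upper encr.toList
  let ab := alphabetA
  -- msg[0] / msg[1] / ab.get: none = IndexError / the TypeError of None + str — excluded by Pre_
  match PySem.List.pyGet? msgU 0, PySem.List.pyGet? msgU 1,
        PySem.List.pyGet? encrU 0, PySem.List.pyGet? encrU 1 with
  | some m0, some m1, some e0, some e1 =>
    match ab.get? m0, ab.get? m1, ab.get? e0, ab.get? e1 with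
    | some a, some b, some c, some d =>
        xorLoopA 10 (a ++ b) (c ++ d)
    | _, _, _, _ => []
  | _, _, _, _ => []

-- ===== PORT B =====
def idxDictB : PySem.Dict Char Int :=
  (PySem.List.enumerate "ABCDEFGHIJKLMNOPQRSTUVWXYZ.!?()-".toList 0).foldl
    (fun d p => d.insert p.2 p.1) PySem.Dict.empty

def keystream_finder_alt (msg : String) (encr : String) : List Int :=
  let idx := idxDictB
  [(0 : Int), 1].foldl (fun out k =>
    -- msg[k] / idx[...]: none = IndexError / KeyError — excluded by Pre_
    match PySem.Str.pyGet? msg k, PySem.Str.pyGet? encr k with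
    | some mc, some ec =>
      match idx.get? (PySem.Chars.upperChar mc), idx.get? (PySem.Chars.upperChar ec) with
      | some im, some ie =>
          let x := PySem.Int.bxor im ie
          out ++ ([(4 : Nat), 3, 2, 1, 0].map (fun s => PySem.Int.band (x >>> s) 1))
      | _, _ => out
    | _, _ => out) []

-- ===== PRECONDITION & SPEC =====
-- Pre_ excludes exactly the inputs where A raises: a string shorter than 2 (IndexError) or a first/second
-- character that is not in the 32-char alphabet after upper() (TypeError from None + str).
def Pre_keystream_finder (msg : String) (encr : String) : Prop :=
  2 ≤ msg.toList.length ∧ 2 ≤ encr.toList.length ∧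
  PySem.Chars.upperChar (msg.toList.getD 0 ' ') ∈ ['A','B','C','D','E','F','G','H','I','J','K','L','M','N','O','P','Q','R','S','T','U','V','W','X','Y','Z','.','!','?','(',')','-'] ∧
  PySem.Chars.upperChar (msg.toList.getD 1 ' ') ∈ ['A','B','C','D','E','F','G','H','I','J','K','L','M','N','O','P','Q','R','S','T','U','V','W','X','Y','Z','.','!','?','(',')','-'] ∧
  PySem.Chars.upperChar (encr.toList.getD 0 ' ') ∈ ['A','B','C','D','E','F','G','H','I','J','K','L','M','N','O','P','Q','R','S','T','U','V','W','X','Y','Z','.','!','?','(',')','-'] ∧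
  PySem.Chars.upperChar (encr.toList.getD 1 ' ') ∈ ['A','B','C','D','E','F','G','H','I','J','K','L','M','N','O','P','Q','R','S','T','U','V','W','X','Y','Z','.','!','?','(',')','-']

instance (msg : String) (encr : String) : Decidable (Pre_keystream_finder msg encr) := by
  unfold Pre_keystream_finder; infer_instance

def pvWitness_keystream_finder : String × String := ("he!", "Lo")

def Spec_keystream_finder (msg : String) (encr : String) (out : List Int) : Prop := out = keystream_finder_alt msg encr
instance (msg : String) (encr : String) (out : List Int) : Decidable (Spec_keystream_finder msg encr out) := by unfold Spec_keystream_finder; infer_instance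

-- ===== CLAIM (what is proved, stated in full; the proofs are below) =====
def Claim_equal_keystream_finder : Prop := ∀ (msg : String) (encr : String), Dom_keystream_finder msg encr → Pre_keystream_finder msg encr → Spec_keystream_finder msg encr (keystream_finder msg encr)

-- ===== LEMMAS AND PROOFS =====

-- the alphabet as a list (proof-side name)
def abL : List Char := ['A','B','C','D','E','F','G','H','I','J','K','L','M','N','O','P','Q','R','S','T','U','V','W','X','Y','Z','.','!','?','(',')','-']

-- A's 5-bit code of index n
def codeA (n : Nat) : List Char :=
  let t := PySem.Int.toBinChars n
  List.replicate (5 - t.length) '0' ++ t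

-- B's 5 bits of one XORed block
def blockB (n m : Nat) : List Int :=
  [(4 : Nat), 3, 2, 1, 0].map (fun s => PySem.Int.band (PySem.Int.bxor n m >>> s) 1)

theorem lookups : ∀ n ∈ List.range 32,
    alphabetA.get? (abL.getD n ' ') = some (codeA n) ∧
    idxDictB.get? (abL.getD n ' ') = some (n : Int) := by decide

theorem block_eq : ∀ n ∈ List.range 32, ∀ m ∈ List.range 32,
    xorLoopA 5 (codeA n) (codeA m) = blockB n m := by decide

theorem len5 {α : Type} (p : List α) (h : p.length = 5) :
    ∃ a b c d e, p = [a, b, c, d, e] := by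
  rcases p with _ | ⟨a, _ | ⟨b, _ | ⟨c, _ | ⟨d, _ | ⟨e, rest⟩⟩⟩⟩⟩ <;> simp_all

theorem codeA_len (n : Nat) (h : n ∈ List.range 32) : (codeA n).length = 5 := by
  revert n h; decide

theorem pyR10 : PySem.List.pyRange 0 10 1 = [0,1,2,3,4,5,6,7,8,9] := by decide
theorem pyR5 : PySem.List.pyRange 0 5 1 = [0,1,2,3,4] := by decide

-- the 10-step loop over two concatenated 5-char codes splits into two 5-step loops
theorem xorLoop_split (p q r t : List Char)
    (hp : p.length = 5) (hq : q.length = 5) (hr : r.length = 5) (ht : t.length = 5) :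
    xorLoopA 10 (p ++ q) (r ++ t) = xorLoopA 5 p r ++ xorLoopA 5 q t := by
  obtain ⟨a0,a1,a2,a3,a4,rfl⟩ := len5 p hp
  obtain ⟨b0,b1,b2,b3,b4,rfl⟩ := len5 q hq
  obtain ⟨c0,c1,c2,c3,c4,rfl⟩ := len5 r hr
  obtain ⟨d0,d1,d2,d3,d4,rfl⟩ := len5 t ht
  simp [xorLoopA, pyR10, pyR5, PySem.List.pyGet?, PySem.List.pyIdx?, List.append_assoc]

theorem keystream_finder_spec : Claim_equal_keystream_finder := by
  intro msg encr _hdom hpre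
  unfold Pre_keystream_finder at hpre
  obtain ⟨hlm, hle, h0, h1, h2, h3⟩ := hpre
  rcases hm : msg.toList with _ | ⟨m0, _ | ⟨m1, mr⟩⟩ <;> rw [hm] at hlm <;> try simp at hlm
  rcases he : encr.toList with _ | ⟨e0, _ | ⟨e1, er⟩⟩ <;> rw [he] at hle <;> try simp at hle
  rw [hm] at h0 h1; rw [he] at h2 h3
  simp only [List.getD_cons_succ, List.getD_cons_zero] at h0 h1 h2 h3
  -- turn memberships into indices into abL
  have habL : ∀ c : Char, c ∈ abL → ∃ n, n ∈ List.range 32 ∧ abL.getD n ' ' = c := by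
    intro c hc
    obtain ⟨n, hn, hEq⟩ := List.mem_iff_getElem.mp hc
    exact ⟨n, by simpa [abL] using hn, by rw [List.getD_eq_getElem _ _ hn]; exact hEq⟩
  obtain ⟨n0, hn0, hc0⟩ := habL _ h0
  obtain ⟨n1, hn1, hc1⟩ := habL _ h1
  obtain ⟨n2, hn2, hc2⟩ := habL _ h2
  obtain ⟨n3, hn3, hc3⟩ := habL _ h3
  obtain ⟨hA0, hB0⟩ := lookups n0 hn0
  obtain ⟨hA1, hB1⟩ := lookups n1 hn1
  obtain ⟨hA2, hB2⟩ := lookups n2 hn2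
  obtain ⟨hA3, hB3⟩ := lookups n3 hn3
  rw [hc0] at hA0 hB0; rw [hc1] at hA1 hB1; rw [hc2] at hA2 hB2; rw [hc3] at hA3 hB3
  show keystream_finder msg encr = keystream_finder_alt msg encr
  have hAside : keystream_finder msg encr = xorLoopA 10 (codeA n0 ++ codeA n1) (codeA n2 ++ codeA n3) := by
    unfold keystream_finder
    rw [show PySem.Chars.upper msg.toList =
          PySem.Chars.upperChar m0 :: PySem.Chars.upperChar m1 :: PySem.Chars.upper mr by
        rw [hm]; rfl,
        show PySem.Chars.upper encr.toList =
          PySem.Chars.upperChar e0 :: PySem.Chars.upperChar e1 :: PySem.Chars.upper er by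
        rw [he]; rfl]
    simp [PySem.List.pyGet?_zero_cons, hA0, hA1, hA2, hA3]
  have hBside : keystream_finder_alt msg encr = blockB n0 n2 ++ blockB n1 n3 := by
    unfold keystream_finder_alt
    simp [PySem.Str.pyGet?_eq, hm, he, PySem.List.pyGet?_zero_cons, hB0, hB1, hB2, hB3, blockB]
  rw [hAside, hBside,
      xorLoop_split _ _ _ _ (codeA_len n0 hn0) (codeA_len n1 hn1) (codeA_len n2 hn2) (codeA_len n3 hn3),
      block_eq n0 hn0 n2 hn2, block_eq n1 hn1 n3 hn3]
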